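-- pv_equiv track=rewrite | github.com/nl-digigo/NLCS | beheer/releasenotesmaken/github_issues_release_notes.py | search_comments_for_release_notes
-- ===== SOURCE A (Python) =====
-- RELEASE_NOTE_TAG = "[Release note]"
--
-- NO_CHANGE_TAG = "[release note: no change from issue]"
--
-- def search_comments_for_release_notes(comments):
--     """
--     Doorzoekt de comments van een issue op release note informatie.
--
--     Zoekt naar:
--     1. Een comment die '[Release note]' bevat         -> release_note_text
--     2. Een comment die '[release note: no change from issue]' bevat -> no_change_text
--     3. De laatste comment (als fallback)              -> last_comment_text
--
--     Parameters:
--         comments: lijst met comment dictionaries van de GitHub API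
--
--     Returns:
--         Een tuple: (release_note_text, no_change_text, last_comment_text)
--     """
--     release_note_text = ""
--     no_change_text = ""
--     last_comment_text = ""
--
--     # Doorloop alle comments
--     for comment in comments:
--         body = comment.get("body", "") or ""
--
--         # Zoek naar [Release note] (case-insensitive)
--         if RELEASE_NOTE_TAG.lower() in body.lower():
--             release_note_text = body.strip()
--
--         # Zoek naar [release note: no change from issue] (case-insensitive)
--         if NO_CHANGE_TAG.lower() in body.lower():
--             no_change_text = body.strip()
--
--     # De laatste comment (als er comments zijn)
--     if comments:
--         last_body = comments[-1].get("body", "") or ""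
--         last_comment_text = last_body.strip()
--
--     # Fallback logica: de laatste comment wordt alleen gebruikt als BEIDE
--     # release_note_text EN no_change_text leeg zijn
--     if release_note_text or no_change_text:
--         last_comment_text = ""
--
--     return release_note_text, no_change_text, last_comment_text
-- ===== SOURCE B (Python) =====
-- RELEASE_NOTE_TAG = "[Release note]"
--
-- NO_CHANGE_TAG = "[release note: no change from issue]"
--
--
-- def _last_match(comments, tag):
--     """Reverse scan: body (stripped) of the LAST comment containing tag, else ''."""
--     t = tag.lower()
--     for comment in reversed(comments):
--         body = comment.get("body", "") or ""
--         if t in body.lower():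
--             return body.strip()
--     return ""
--
--
-- def search_comments_for_release_notes(comments):
--     release_note_text = _last_match(comments, RELEASE_NOTE_TAG)
--     no_change_text = _last_match(comments, NO_CHANGE_TAG)
--     if release_note_text or no_change_text:
--         last_comment_text = ""
--     elif comments:
--         last_comment_text = (comments[-1].get("body", "") or "").strip()
--     else:
--         last_comment_text = ""
--     return release_note_text, no_change_text, last_comment_text
-- ===== Notes on version B (the rewrite author's own statement) =====
-- stated objective: idiomatic
-- what changed: Replaces the forward scan that overwrites both accumulators on every match with a reverse search per tag that stops at the first (i.e. last) match, and computes the last-comment fallback lazily only when both tags are absent.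
import Mathlib
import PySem

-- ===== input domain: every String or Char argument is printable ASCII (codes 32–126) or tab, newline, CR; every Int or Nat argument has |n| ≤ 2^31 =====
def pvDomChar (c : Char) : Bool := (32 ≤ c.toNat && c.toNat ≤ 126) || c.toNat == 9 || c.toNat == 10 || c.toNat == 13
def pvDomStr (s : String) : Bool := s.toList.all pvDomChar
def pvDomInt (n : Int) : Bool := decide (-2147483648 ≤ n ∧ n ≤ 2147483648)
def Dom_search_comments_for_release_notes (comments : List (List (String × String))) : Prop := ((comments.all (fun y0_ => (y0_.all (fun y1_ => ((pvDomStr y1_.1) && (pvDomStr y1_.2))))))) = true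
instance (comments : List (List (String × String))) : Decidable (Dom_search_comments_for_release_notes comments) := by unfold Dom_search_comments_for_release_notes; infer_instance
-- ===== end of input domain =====

-- B replaces A's forward overwrite-scan by a reverse per-tag search with early stop; same results, idiomatic decomposition.


-- ===== PORT A =====
-- comment.get("body", "") or "" : with String values 'or ""' is the identity (x or "" = x when x ≠ "", "" when x = "")
def pvBodyA (c : List (String × String)) : String :=
  PySem.Dict.getD (PySem.Dict.mk c) "body" ""

def search_comments_for_release_notes (comments : List (List (String × String))) : String × String × String :=
  let st := comments.foldl (fun (st : String × String) c =>
      let body := pvBodyA c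
      let rn := if PySem.Str.isIn (PySem.Str.lower "[Release note]") (PySem.Str.lower body)
                then PySem.Str.strip body else st.1
      let nc := if PySem.Str.isIn (PySem.Str.lower "[release note: no change from issue]") (PySem.Str.lower body)
                then PySem.Str.strip body else st.2
      (rn, nc)) ("", "")
  let last := match PySem.List.pyGet? comments (-1) with
    | some c => PySem.Str.strip (pvBodyA c)   -- 'if comments:' — pyGet? is none exactly on []
    | none => ""
  (st.1, st.2, if st.1 ≠ "" ∨ st.2 ≠ "" then "" else last)

-- ===== PORT B =====
-- the reversed(comments) loop with early return
def pvLastMatchRev (t : String) : List (List (String × String)) → String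
  | [] => ""
  | c :: rest =>
      let body := pvBodyA c
      if PySem.Str.isIn t (PySem.Str.lower body) then PySem.Str.strip body
      else pvLastMatchRev t rest

def pvLastMatch (comments : List (List (String × String))) (tag : String) : String :=
  pvLastMatchRev (PySem.Str.lower tag) comments.reverse

def search_comments_for_release_notes_alt (comments : List (List (String × String))) : String × String × String :=
  let release := pvLastMatch comments "[Release note]"
  let noChange := pvLastMatch comments "[release note: no change from issue]"
  let last :=
    if release ≠ "" ∨ noChange ≠ "" then ""
    else match PySem.List.pyGet? comments (-1) with
      | some c => PySem.Str.strip (pvBodyA c)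
      | none => ""
  (release, noChange, last)

-- ===== PRECONDITION & SPEC =====
def Spec_search_comments_for_release_notes (comments : List (List (String × String))) (out : String × String × String) : Prop := out = search_comments_for_release_notes_alt comments
instance (comments : List (List (String × String))) (out : String × String × String) : Decidable (Spec_search_comments_for_release_notes comments out) := by unfold Spec_search_comments_for_release_notes; infer_instance

-- ===== CLAIM (what is proved, stated in full; the proofs are below) =====
def Claim_equal_search_comments_for_release_notes : Prop := ∀ (comments : List (List (String × String))), Dom_search_comments_for_release_notes comments → Spec_search_comments_for_release_notes comments (search_comments_for_release_notes comments)

-- ===== LEMMAS AND PROOFS =====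
-- A's overwrite-on-match foldl = first match of the reversed list
theorem foldl_overwrite_eq_find_rev (t : String) (l : List (List (String × String))) (a : String) :
    l.foldl (fun s c => if PySem.Str.isIn t (PySem.Str.lower (pvBodyA c))
                        then PySem.Str.strip (pvBodyA c) else s) a
    = (match l.reverse.find? (fun c => PySem.Str.isIn t (PySem.Str.lower (pvBodyA c))) with
       | some c => PySem.Str.strip (pvBodyA c)
       | none => a) := by
  induction l generalizing a with
  | nil => simp
  | cons c rest ih =>
      simp only [List.foldl_cons, List.reverse_cons, ih, List.find?_append]
      cases h : rest.reverse.find? (fun c => PySem.Str.isIn t (PySem.Str.lower (pvBodyA c))) with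
      | some d => simp
      | none =>
          simp only [List.find?]
          cases hq : PySem.Chars.isIn t.toList (PySem.Chars.lower (pvBodyA c).toList) <;> simp [hq]

-- B's reverse loop = first match of the list it walks
theorem pvLastMatchRev_eq_find (t : String) (m : List (List (String × String))) :
    pvLastMatchRev t m
    = (match m.find? (fun c => PySem.Str.isIn t (PySem.Str.lower (pvBodyA c))) with
       | some c => PySem.Str.strip (pvBodyA c)
       | none => "") := by
  induction m with
  | nil => simp [pvLastMatchRev]
  | cons c rest ih =>
      simp only [pvLastMatchRev, ih, List.find?]
      cases hq : PySem.Chars.isIn t.toList (PySem.Chars.lower (pvBodyA c).toList) <;> simp [hq]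

-- A's paired fold splits into two independent folds
theorem foldl_pair_split (l : List (List (String × String))) (a b : String) :
    l.foldl (fun (st : String × String) c =>
        (if PySem.Str.isIn (PySem.Str.lower "[Release note]") (PySem.Str.lower (pvBodyA c))
         then PySem.Str.strip (pvBodyA c) else st.1,
         if PySem.Str.isIn (PySem.Str.lower "[release note: no change from issue]") (PySem.Str.lower (pvBodyA c))
         then PySem.Str.strip (pvBodyA c) else st.2)) (a, b)
    = (l.foldl (fun s c => if PySem.Str.isIn (PySem.Str.lower "[Release note]") (PySem.Str.lower (pvBodyA c))
                           then PySem.Str.strip (pvBodyA c) else s) a,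
       l.foldl (fun s c => if PySem.Str.isIn (PySem.Str.lower "[release note: no change from issue]") (PySem.Str.lower (pvBodyA c))
                           then PySem.Str.strip (pvBodyA c) else s) b) := by
  induction l generalizing a b with
  | nil => rfl
  | cons c rest ih => simp only [List.foldl_cons]; exact ih _ _

-- ===== VERDICT (by name: the statement is the Claim_ definition above) =====
theorem search_comments_for_release_notes_spec : Claim_equal_search_comments_for_release_notes := by
  intro comments _
  show _ = _
  unfold search_comments_for_release_notes search_comments_for_release_notes_alt
    pvLastMatch
  simp only [foldl_pair_split, foldl_overwrite_eq_find_rev, pvLastMatchRev_eq_find]
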